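-- pv_equiv track=rewrite | github.com/noemiernst/StackExchangeMathDataset | classification_training_data/code2seq_preprocess.py | pad_path
-- ===== SOURCE A (Python) =====
-- def pad_path(path, length):
--     path = list(path)
--     string = ""
--     for i in range(length):
--         if len(path) <= i:
--             string += "<pad>"
--         else:
--             string += path[i]
--         if i != length-1:
--             string += "|"
--
--     return string
-- ===== SOURCE B (Python) =====
-- def pad_path(path, length):
--     n = max(length, 0)
--     toks = list(path)[:n]
--     toks += ["<pad>"] * (n - len(toks))
--     return "|".join(toks)
-- ===== Notes on version B (the rewrite author's own statement) =====
-- stated objective: simpler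
-- what changed: Builds the padded token list (truncate/extend) and joins once with '|', instead of an index loop that appends a token and a conditional separator per iteration.
import Mathlib
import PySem

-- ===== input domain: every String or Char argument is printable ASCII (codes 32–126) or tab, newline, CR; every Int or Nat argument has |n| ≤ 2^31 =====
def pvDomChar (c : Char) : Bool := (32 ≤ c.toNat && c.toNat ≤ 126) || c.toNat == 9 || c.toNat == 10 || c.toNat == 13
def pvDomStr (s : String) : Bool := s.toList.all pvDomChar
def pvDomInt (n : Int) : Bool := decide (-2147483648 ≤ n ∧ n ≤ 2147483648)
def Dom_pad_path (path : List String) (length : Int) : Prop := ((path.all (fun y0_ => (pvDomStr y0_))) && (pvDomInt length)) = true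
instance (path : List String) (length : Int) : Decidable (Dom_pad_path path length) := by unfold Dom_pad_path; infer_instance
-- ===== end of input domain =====

-- B replaces A's index loop with a conditional separator by a build-then-join decomposition
-- (truncate/extend the token list, then a single '|'-join); same output, similar cost.

-- ===== PORT A =====
def pad_path (path : List String) (length : Int) : String :=
  (PySem.List.pyRange 0 length 1).foldl
    (fun string i =>
      let string :=
        if (path.length : Int) ≤ i then string ++ "<pad>"
        else string ++ PySem.List.pyGetD path i ""
      if i ≠ length - 1 then string ++ "|" else string)
    ""

-- ===== PORT B =====
def pad_path_alt (path : List String) (length : Int) : String :=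
  let n : Int := max length 0
  let toks := PySem.List.slice path none (some n)
  let toks := toks ++ List.replicate (n - (toks.length : Int)).toNat "<pad>"
  PySem.Str.join "|" toks

-- ===== PRECONDITION & SPEC =====
def Spec_pad_path (path : List String) (length : Int) (out : String) : Prop := out = pad_path_alt path length
instance (path : List String) (length : Int) (out : String) : Decidable (Spec_pad_path path length out) := by unfold Spec_pad_path; infer_instance

-- ===== CLAIM (what is proved, stated in full; the proofs are below) =====
def Claim_equal_pad_path : Prop := ∀ (path : List String) (length : Int), Dom_pad_path path length → Spec_pad_path path length (pad_path path length)

-- ===== LEMMAS AND PROOFS =====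

-- the i-th token of the padded sequence, as a string
def tokS (path : List String) (i : Nat) : String :=
  if path.length ≤ i then "<pad>" else path.getD i ""

-- the same token as a character list
def tok (path : List String) (i : Nat) : List Char := (tokS path i).toList

-- B's truncated-and-padded token list is exactly the first k tokens
lemma take_pad_eq_map_range (path : List String) (k : Nat) :
    path.take k ++ List.replicate (k - path.length) "<pad>" = (List.range k).map (tokS path) := by
  apply List.ext_getElem
  · simp; omega
  · intro i h1 h2
    simp only [List.length_append, List.length_take, List.length_replicate] at h1
    have hik : i < k := by omega
    simp only [List.getElem_map, List.getElem_range]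
    by_cases hl : i < path.length
    · rw [List.getElem_append_left (by simp; omega)]
      simp [tokS, List.getD_eq_getElem?_getD, List.getElem?_eq_getElem hl,
        Nat.not_le.mpr hl, List.getElem_take]
    · rw [List.getElem_append_right (by simp; omega)]
      simp [tokS, Nat.le_of_not_lt hl]

-- join of a snoc, with the separators distributed onto the leading elements
lemma join_snoc (sep : List Char) :
    ∀ (l : List (List Char)) (x : List Char),
      PySem.Chars.join sep (l ++ [x]) = l.flatMap (fun y => y ++ sep) ++ x := by
  intro l
  induction l with
  | nil => intro x; simp [PySem.Chars.join_singleton]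
  | cons a l ih =>
    intro x
    cases l with
    | nil => simp [PySem.Chars.join_cons_cons, PySem.Chars.join_singleton]
    | cons b l' =>
      have := ih x
      simp only [List.cons_append, PySem.Chars.join_cons_cons] at this ⊢
      simp [this]

-- flatMap respects pointwise-on-members equality
lemma flatMap_congr_mem {α β : Type} (l : List α) (f g : α → List β)
    (h : ∀ x ∈ l, f x = g x) : l.flatMap f = l.flatMap g := by
  induction l with
  | nil => rfl
  | cons a l ih =>
    simp only [List.flatMap_cons]
    rw [h a (by simp), ih (fun x hx => h x (by simp [hx]))]

-- A's loop, unrolled: character-level chunks, one token plus its conditional separator per index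
lemma pad_path_toList (path : List String) (length : Int) :
    (pad_path path length).toList =
      (List.range length.toNat).flatMap
        (fun i => tok path i ++ (if (i : Int) ≠ length - 1 then "|".toList else [])) := by
  unfold pad_path
  rw [PySem.List.pyRange_one]
  simp only [Int.sub_zero, Int.zero_add]
  generalize length.toNat = k
  induction k with
  | zero => simp
  | succ m ih =>
    rw [List.range_succ, List.map_append, List.foldl_append, List.flatMap_append, ← ih]
    simp only [List.map_cons, List.map_nil, List.foldl_cons, List.foldl_nil,
      List.flatMap_cons, List.flatMap_nil, List.append_nil]
    split_ifs with h1 h2 h2 <;>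
      [ simp [tok, tokS, String.toList_append, Int.ofNat_le.symm, h2];
        simp [tok, tokS, String.toList_append, Int.ofNat_le.symm, h2];
        simp [tok, tokS, String.toList_append, Int.ofNat_le.symm, h2];
        simp [tok, tokS, String.toList_append, PySem.List.pyGetD_natCast,
          Int.ofNat_le.symm, h2] ]

-- the unrolled chunks are exactly a '|'-join of the tokens
lemma chunks_eq_join (path : List String) (length : Int) (h : 0 < length) :
    (List.range length.toNat).flatMap
        (fun i => tok path i ++ (if (i : Int) ≠ length - 1 then "|".toList else [])) =
      PySem.Chars.join "|".toList ((List.range length.toNat).map (tok path)) := by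
  obtain ⟨m, hm⟩ : ∃ m, length.toNat = m + 1 := ⟨length.toNat - 1, by omega⟩
  have hlen : length = ((m : Int) + 1) := by omega
  rw [hm, List.range_succ, List.map_append, List.flatMap_append]
  simp only [List.map_cons, List.map_nil, List.flatMap_cons, List.flatMap_nil, List.append_nil]
  rw [join_snoc, List.flatMap_map]
  congr 1
  · apply flatMap_congr_mem
    intro i hi
    have : i < m := List.mem_range.mp hi
    rw [if_pos (by rw [hlen]; omega)]
  · rw [if_neg (by rw [hlen]; omega)]
    simp

-- B's result, at the character level: the '|'-join of the first length.toNat tokens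
lemma pad_path_alt_toList (path : List String) (length : Int) :
    (pad_path_alt path length).toList =
      PySem.Chars.join "|".toList ((List.range length.toNat).map (tok path)) := by
  have hmax : max length 0 = ((length.toNat : Nat) : Int) := by omega
  simp only [pad_path_alt, hmax, PySem.List.slice_to_natCast]
  have hrep : ((length.toNat : Int) - ((path.take length.toNat).length : Int)).toNat
      = length.toNat - path.length := by
    simp [List.length_take]; omega
  rw [hrep, take_pad_eq_map_range, PySem.Str.toList_join, List.map_map]
  rfl

-- ===== VERDICT (by name: the statement is the Claim_ definition above) =====
theorem pad_path_spec : Claim_equal_pad_path := by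
  intro path length _
  show pad_path path length = pad_path_alt path length
  apply String.toList_inj.mp
  rw [pad_path_alt_toList]
  by_cases h : 0 < length
  · rw [pad_path_toList, chunks_eq_join path length h]
  · have hz : length.toNat = 0 := by omega
    have hr : PySem.List.pyRange 0 length 1 = [] :=
      PySem.List.pyRange_one_eq_nil (by omega)
    simp [pad_path, hr, hz, PySem.Chars.join_nil]
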